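-- pv_equiv track=rewrite | github.com/Dvckhv/IIC2233_Programacion-Avanzada | Dvckhv-iic2233-2022-1/Actividades/AF4/ayudantes.py | cantidad_ingredientes
-- ===== SOURCE A (Python) =====
-- from functools import reduce
--
-- def cantidad_ingredientes(lista_ingredientes_platos): #REVISAR
--     lista_ingredientes=reduce(lambda x,y:x+y ,lista_ingredientes_platos)
--     lista_nombres=[]
--     lista_cantidades=[]
--     for ingrediente in lista_ingredientes:
--         if ingrediente[0] not in lista_nombres:
--             lista_nombres.append(ingrediente[0])
--             lista_cantidades.append(ingrediente[1])
--         else: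
--             for n,nombre in enumerate(lista_nombres):
--                 if nombre==ingrediente[0]:
--                     lista_cantidades[n]+=ingrediente[1]
--     lista_reducida=zip(lista_nombres,lista_cantidades)
--     for ingrediente in lista_reducida:
--         yield ingrediente
-- ===== SOURCE B (Python) =====
-- def cantidad_ingredientes(lista_ingredientes_platos):
--     flat = [ing for plato in lista_ingredientes_platos for ing in plato]
--     nombres = []
--     for nombre, _ in flat:
--         if nombre not in nombres:
--             nombres.append(nombre)
--     for nombre in nombres:
--         yield (nombre, sum(c for n, c in flat if n == nombre))
-- ===== Notes on version B (the rewrite author's own statement) =====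
-- stated objective: simpler
-- what changed: Replaces A's single accumulate-pass over parallel name/quantity lists with inner index-update loop by two plain passes: collect distinct names in first-seen order, then sum each name's quantities with a per-name generator sum; flattening uses a comprehension instead of reduce. (On the empty outer list, excluded by Pre_, A raises TypeError from reduce at first next(); B naturally yields nothing.)
import Mathlib
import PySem

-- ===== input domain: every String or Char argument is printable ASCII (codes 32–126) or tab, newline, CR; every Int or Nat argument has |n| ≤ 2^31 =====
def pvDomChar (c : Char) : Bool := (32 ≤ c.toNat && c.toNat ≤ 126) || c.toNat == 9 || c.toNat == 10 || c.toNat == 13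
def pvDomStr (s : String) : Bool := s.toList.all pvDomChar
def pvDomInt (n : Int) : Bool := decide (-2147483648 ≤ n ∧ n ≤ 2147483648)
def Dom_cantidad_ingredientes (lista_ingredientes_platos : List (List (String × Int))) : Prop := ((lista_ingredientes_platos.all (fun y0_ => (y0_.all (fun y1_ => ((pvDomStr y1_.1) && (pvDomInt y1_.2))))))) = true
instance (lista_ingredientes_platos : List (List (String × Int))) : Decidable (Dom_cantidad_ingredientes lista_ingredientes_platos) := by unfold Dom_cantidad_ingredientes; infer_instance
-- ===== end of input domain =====

-- B replaces A's single accumulate-pass (parallel name/quantity lists, inner index-update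
-- loop) by two plain passes: distinct names in first-seen order, then a per-name sum.
-- Both are generators in Python; ports compare the yielded sequence as a list.

-- ===== PORT A =====
-- inner 'for n,nombre in enumerate(lista_nombres): if nombre==ing[0]: lista_cantidades[n]+=ing[1]'
def updIdx : List String → Nat → String → Int → List Int → List Int
  | [], _, _, _, cs => cs
  | nombre :: rest, i, n, q, cs =>
      updIdx rest (i + 1) n q (if nombre = n then cs.set i (cs.getD i 0 + q) else cs)

-- body of A's main for-loop over the flattened ingredient list
def stepA (st : List String × List Int) (ing : String × Int) : List String × List Int :=
  if ing.1 ∉ st.1 then (st.1 ++ [ing.1], st.2 ++ [ing.2])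
  else (st.1, updIdx st.1 0 ing.1 ing.2 st.2)

def cantidad_ingredientes (lista_ingredientes_platos : List (List (String × Int))) : List (String × Int) :=
  -- reduce(lambda x,y:x+y, l): raises TypeError on []; that input is outside Pre_
  match lista_ingredientes_platos with
  | [] => []
  | h :: t =>
      let lista_ingredientes := t.foldl (fun x y => x ++ y) h
      let st := lista_ingredientes.foldl stepA ([], [])
      st.1.zip st.2

-- ===== PORT B =====
def cantidad_ingredientes_alt (lista_ingredientes_platos : List (List (String × Int))) : List (String × Int) :=
  let flat := lista_ingredientes_platos.flatMap id
  let nombres := flat.foldl (fun ns p => if p.1 ∈ ns then ns else ns ++ [p.1]) []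
  nombres.map (fun nm => (nm, (flat.filter (fun p => p.1 = nm)).foldl (fun s p => s + p.2) 0))

-- ===== PRECONDITION & SPEC =====
-- Pre_ excludes only the empty outer list, on which Python A raises TypeError (reduce of an empty sequence).
def Pre_cantidad_ingredientes (lista_ingredientes_platos : List (List (String × Int))) : Prop :=
  lista_ingredientes_platos ≠ []
instance (lista_ingredientes_platos : List (List (String × Int))) : Decidable (Pre_cantidad_ingredientes lista_ingredientes_platos) := by unfold Pre_cantidad_ingredientes; infer_instance

def pvWitness_cantidad_ingredientes : (List (List (String × Int))) := [[("a", 1), ("b", 2)], [("a", 3)]]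

def Spec_cantidad_ingredientes (lista_ingredientes_platos : List (List (String × Int))) (out : List (String × Int)) : Prop := out = cantidad_ingredientes_alt lista_ingredientes_platos
instance (lista_ingredientes_platos : List (List (String × Int))) (out : List (String × Int)) : Decidable (Spec_cantidad_ingredientes lista_ingredientes_platos out) := by unfold Spec_cantidad_ingredientes; infer_instance

-- ===== CLAIM (what is proved, stated in full; the proofs are below) =====
def Claim_equal_cantidad_ingredientes : Prop := ∀ (lista_ingredientes_platos : List (List (String × Int))), Dom_cantidad_ingredientes lista_ingredientes_platos → Pre_cantidad_ingredientes lista_ingredientes_platos → Spec_cantidad_ingredientes lista_ingredientes_platos (cantidad_ingredientes lista_ingredientes_platos)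

-- ===== LEMMAS AND PROOFS =====

-- S nm l: total quantity of ingredient nm in l
def pvS (nm : String) (l : List (String × Int)) : Int :=
  (l.map (fun p => if p.1 = nm then p.2 else 0)).sum

-- first-seen distinct names of l, appended after ns
def addN (ns : List String) (l : List (String × Int)) : List String :=
  l.foldl (fun ns p => if p.1 ∈ ns then ns else ns ++ [p.1]) ns

theorem pvS_cons (nm : String) (p : String × Int) (l : List (String × Int)) :
    pvS nm (p :: l) = (if p.1 = nm then p.2 else 0) + pvS nm l := by
  simp [pvS]

theorem getD_append_len (pre : List Int) (x : Int) (l : List Int) (d : Int) :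
    (pre ++ x :: l).getD pre.length d = x := by
  induction pre with
  | nil => rfl
  | cons a t ih => simpa using ih

theorem set_append_len (pre : List Int) (x v : Int) (l : List Int) :
    (pre ++ x :: l).set pre.length v = pre ++ v :: l := by
  induction pre with
  | nil => rfl
  | cons a t ih => simpa using ih

theorem updIdx_spec (ns : List String) (pre : List Int) (g : String → Int) (n : String) (q : Int)
    (hnd : ns.Nodup) :
    updIdx ns pre.length n q (pre ++ ns.map g)
      = pre ++ ns.map (fun nm => if nm = n then g nm + q else g nm) := by
  induction ns generalizing pre g with
  | nil => simp [updIdx]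
  | cons nombre rest ih =>
      rcases List.nodup_cons.mp hnd with ⟨hnr, hrest⟩
      by_cases h : nombre = n
      · subst h
        have hset : (pre ++ (g nombre) :: rest.map g).set pre.length
            ((pre ++ (g nombre) :: rest.map g).getD pre.length 0 + q)
            = pre ++ (g nombre + q) :: rest.map g := by
          rw [getD_append_len, set_append_len]
        have := ih (pre ++ [g nombre + q])
          (fun nm => if nm = nombre then g nm + q else g nm) hrest
        simp only [updIdx, if_pos rfl, List.map_cons, List.cons_append] at *
        rw [hset]
        have hmap : rest.map (fun nm => if nm = nombre then g nm + q else g nm) = rest.map g :=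
          List.map_congr_left (fun nm hm => by
            have : nm ≠ nombre := fun e => hnr (e ▸ hm)
            simp [this])
        have hpre : (pre ++ [g nombre + q]) ++ rest.map g = pre ++ (g nombre + q) :: rest.map g := by
          simp
        calc updIdx rest (pre.length + 1) nombre q (pre ++ (g nombre + q) :: rest.map g)
            = updIdx rest (pre ++ [g nombre + q]).length nombre q
                ((pre ++ [g nombre + q]) ++ rest.map g) := by
              rw [hpre]; simp
          _ = (pre ++ [g nombre + q]) ++ rest.map (fun nm => if nm = nombre then g nm + q else g nm) :=
              ih (pre ++ [g nombre + q]) g hrest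
          _ = pre ++ (g nombre + q) :: rest.map (fun nm => if nm = nombre then g nm + q else g nm) := by
              rw [hmap]
              simp
      · have := ih (pre ++ [g nombre]) g hrest
        simp only [updIdx, if_neg h, List.map_cons, List.cons_append]
        have hpre : (pre ++ [g nombre]) ++ rest.map g = pre ++ (g nombre) :: rest.map g := by simp
        calc updIdx rest (pre.length + 1) n q (pre ++ (g nombre) :: rest.map g)
            = updIdx rest (pre ++ [g nombre]).length n q ((pre ++ [g nombre]) ++ rest.map g) := by
              rw [hpre]; simp
          _ = (pre ++ [g nombre]) ++ rest.map (fun nm => if nm = n then g nm + q else g nm) := this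
          _ = pre ++ (g nombre) :: rest.map (fun nm => if nm = n then g nm + q else g nm) := by
              simp [h]

theorem loop_inv (r : List (String × Int)) (ns : List String) (g : String → Int)
    (hnd : ns.Nodup) :
    r.foldl stepA (ns, ns.map g)
      = (addN ns r, (addN ns r).map (fun nm => (if nm ∈ ns then g nm else 0) + pvS nm r)) := by
  induction r generalizing ns g with
  | nil =>
      simp only [List.foldl_nil, addN, pvS, List.map_nil, List.sum_nil]
      refine Prod.ext rfl ?_
      exact (List.map_congr_left (fun nm hm => by simp [hm])).symm
  | cons p r' ih =>
      obtain ⟨n, q⟩ := p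
      by_cases h : n ∈ ns
      · have hstep : stepA (ns, ns.map g) (n, q)
            = (ns, ns.map (fun nm => if nm = n then g nm + q else g nm)) := by
          have := updIdx_spec ns [] g n q hnd
          simpa [stepA, h] using this
        have := ih ns (fun nm => if nm = n then g nm + q else g nm) hnd
        rw [List.foldl_cons, hstep, this]
        have haddN : addN ns ((n, q) :: r') = addN ns r' := by simp [addN, h]
        rw [haddN]
        refine Prod.ext rfl ?_
        refine List.map_congr_left (fun nm _ => ?_)
        rw [pvS_cons]
        by_cases hm : nm ∈ ns
        · by_cases he : nm = n
          · subst he; simp [hm]; omega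
          · simp [hm, he, Ne.symm he]
        · have hne : nm ≠ n := fun e => hm (e ▸ h)
          simp [hm, hne, Ne.symm hne]
      · have hstep : stepA (ns, ns.map g) (n, q)
            = (ns ++ [n], (ns ++ [n]).map (fun nm => if nm = n then q else g nm)) := by
          have hmap : ns.map (fun nm => if nm = n then q else g nm) = ns.map g :=
            List.map_congr_left (fun nm hm => by
              have : nm ≠ n := fun e => h (e ▸ hm)
              simp [this])
          simp [stepA, h, hmap]
        have hnd' : (ns ++ [n]).Nodup :=
          hnd.append (List.nodup_singleton _) (fun a ha hb => h ((List.mem_singleton.mp hb) ▸ ha))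
        have := ih (ns ++ [n]) (fun nm => if nm = n then q else g nm) hnd'
        rw [List.foldl_cons, hstep, this]
        have haddN : addN ns ((n, q) :: r') = addN (ns ++ [n]) r' := by simp [addN, h]
        rw [haddN]
        refine Prod.ext rfl ?_
        refine List.map_congr_left (fun nm _ => ?_)
        rw [pvS_cons]
        by_cases he : nm = n
        · subst he
          simp [h]
        · by_cases hm : nm ∈ ns <;> simp [hm, he, Ne.symm he]

theorem sumB_eq_pvS_aux (nm : String) (l : List (String × Int)) (s : Int) :
    (l.filter (fun p => p.1 = nm)).foldl (fun s p => s + p.2) s = s + pvS nm l := by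
  induction l generalizing s with
  | nil => simp [pvS]
  | cons p r ih =>
      rw [pvS_cons]
      by_cases h : p.1 = nm
      · simp only [List.filter_cons, h, decide_true, if_true, List.foldl_cons]
        rw [ih (s + p.2)]
        omega
      · have : (decide (p.1 = nm)) = false := by simp [h]
        simp only [List.filter_cons, this, Bool.false_eq_true, if_false]
        rw [ih s, if_neg h]
        omega

theorem flatten_eq (h : List (String × Int)) (t : List (List (String × Int))) :
    t.foldl (fun x y => x ++ y) h = (h :: t).flatMap id := by
  induction t generalizing h with
  | nil => simp
  | cons a t ih => simp [List.foldl_cons, ih (h ++ a)]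

theorem zip_map_self {α β : Type} (l : List α) (f : α → β) :
    l.zip (l.map f) = l.map (fun x => (x, f x)) := by
  induction l with
  | nil => rfl
  | cons a t ih => simp [ih]

-- ===== VERDICT (by name: the statement is the Claim_ definition above) =====
theorem cantidad_ingredientes_spec : Claim_equal_cantidad_ingredientes := by
  intro l _ hpre
  unfold Spec_cantidad_ingredientes
  match l, hpre with
  | h :: t, _ =>
    show (let flat := t.foldl (fun x y => x ++ y) h
          let st := flat.foldl stepA ([], [])
          st.1.zip st.2) = _
    simp only [cantidad_ingredientes_alt]
    rw [flatten_eq h t]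
    set flat := (h :: t).flatMap id with hflat
    have hinv := loop_inv flat [] (fun _ => 0) List.nodup_nil
    simp only [List.map_nil] at hinv
    rw [hinv]
    simp only [List.not_mem_nil, if_false, zero_add]
    rw [zip_map_self]
    have hnames : addN [] flat
        = flat.foldl (fun ns p => if p.1 ∈ ns then ns else ns ++ [p.1]) [] := rfl
    rw [← hnames]
    refine List.map_congr_left (fun nm _ => ?_)
    have := sumB_eq_pvS_aux nm flat 0
    simp only [zero_add] at this
    rw [this]
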